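-- pv_equiv track=rewrite | github.com/imansarwar/AlliedVision-ImageAnalysis | keys_comparison.py | group_keys_into_rows
-- ===== SOURCE A (Python) =====
-- def group_keys_into_rows(key_bounding_boxes, row_tolerance=30):
--     """Group keys into rows based on their Y-coordinates."""
--     rows = []
--     current_row = []
--     current_y = None
--
--     for box in key_bounding_boxes:
--         x, y, w, h = box
--         if current_y is None or abs(y - current_y) < row_tolerance:
--             current_row.append(box)
--             current_y = y
--         else:
--             rows.append(current_row)
--             current_row = [box]
--             current_y = y
--
--     if current_row:
--         rows.append(current_row)
--
--     # Sort each row by X-coordinate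
--     for row in rows:
--         row.sort(key=lambda box: box[0])
--
--     return rows
-- ===== SOURCE B (Python) =====
-- def group_keys_into_rows(key_bounding_boxes, row_tolerance=30):
--     """Group keys into rows: consume one whole row at a time (span of boxes whose
--     consecutive Y-gaps are < tolerance), sorting each row by X as it is built."""
--     rows = []
--     rest = list(key_bounding_boxes)
--     while rest:
--         head, tail = rest[0], rest[1:]
--         row, rest = _take_row(head, tail, row_tolerance)
--         rows.append(sorted([head] + row, key=lambda b: b[0]))
--     return rows
--
-- def _take_row(prev, rest, tol):
--     """Longest prefix of rest whose boxes stay within tol of the previous box's Y,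
--     plus the remaining suffix."""
--     i = 0
--     while i < len(rest) and abs(rest[i][1] - prev[1]) < tol:
--         prev = rest[i]
--         i += 1
--     return rest[:i], rest[i:]
-- ===== Notes on version B (the rewrite author's own statement) =====
-- stated objective: alternative
-- what changed: Replaced A's single box-at-a-time state machine (current_row/current_y accumulator plus a separate final sorting pass) by an outer loop that consumes one whole row at a time via a span helper and sorts each row as it is produced.
import Mathlib
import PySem

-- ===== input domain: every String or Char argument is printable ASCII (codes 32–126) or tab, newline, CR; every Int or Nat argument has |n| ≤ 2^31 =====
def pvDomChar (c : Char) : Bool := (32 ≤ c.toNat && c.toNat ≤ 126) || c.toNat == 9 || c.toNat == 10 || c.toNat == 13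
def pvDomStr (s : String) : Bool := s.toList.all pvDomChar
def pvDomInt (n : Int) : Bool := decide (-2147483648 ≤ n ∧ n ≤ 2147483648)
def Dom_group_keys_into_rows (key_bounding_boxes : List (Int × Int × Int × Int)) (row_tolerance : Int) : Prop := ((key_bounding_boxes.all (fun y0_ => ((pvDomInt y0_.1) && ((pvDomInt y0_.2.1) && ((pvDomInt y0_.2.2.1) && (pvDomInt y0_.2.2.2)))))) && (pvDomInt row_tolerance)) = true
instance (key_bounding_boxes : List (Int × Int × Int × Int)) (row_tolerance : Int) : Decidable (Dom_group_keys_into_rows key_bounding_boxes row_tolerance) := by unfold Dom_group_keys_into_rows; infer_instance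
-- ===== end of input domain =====

-- B consumes one whole row at a time via a span helper and sorts each row as built,
-- instead of A's box-at-a-time state machine with a final sorting pass (objective: alternative).


-- ===== PORT A =====
-- one iteration of A's for-loop: state = (rows, current_row, current_y)
def gkirStep (tol : Int) (st : List (List (Int × Int × Int × Int)) × List (Int × Int × Int × Int) × Option Int)
    (box : Int × Int × Int × Int) :
    List (List (Int × Int × Int × Int)) × List (Int × Int × Int × Int) × Option Int :=
  let (rows, current_row, current_y) := st
  match current_y with
  | none => (rows, current_row ++ [box], some box.2.1)
  | some cy =>
    if |box.2.1 - cy| < tol then (rows, current_row ++ [box], some box.2.1)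
    else (rows ++ [current_row], [box], some box.2.1)

def group_keys_into_rows (key_bounding_boxes : List (Int × Int × Int × Int)) (row_tolerance : Int) : List (List (Int × Int × Int × Int)) :=
  let st := key_bounding_boxes.foldl (gkirStep row_tolerance) ([], [], none)
  let rows := if st.2.1 ≠ [] then st.1 ++ [st.2.1] else st.1
  rows.map (fun row => PySem.List.sorted row (fun box => box.1) false)

-- ===== PORT B =====
-- _take_row: longest prefix of rest within tol of the previous box's Y, plus the suffix
def takeRowB (prev : Int × Int × Int × Int) (rest : List (Int × Int × Int × Int)) (tol : Int) :
    List (Int × Int × Int × Int) × List (Int × Int × Int × Int) :=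
  match rest with
  | [] => ([], [])
  | b :: bs =>
    if |b.2.1 - prev.2.1| < tol then
      let p := takeRowB b bs tol
      (b :: p.1, p.2)
    else ([], b :: bs)

theorem takeRowB_snd_length (prev : Int × Int × Int × Int) (rest : List (Int × Int × Int × Int)) (tol : Int) :
    (takeRowB prev rest tol).2.length ≤ rest.length := by
  induction rest generalizing prev with
  | nil => simp [takeRowB]
  | cons b bs ih =>
    simp only [takeRowB]
    split
    · exact le_trans (ih b) (Nat.le_succ _)
    · simp

def group_keys_into_rows_alt (key_bounding_boxes : List (Int × Int × Int × Int)) (row_tolerance : Int) : List (List (Int × Int × Int × Int)) :=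
  match key_bounding_boxes with
  | [] => []
  | head :: tail =>
    let p := takeRowB head tail row_tolerance
    PySem.List.sorted (head :: p.1) (fun b => b.1) false :: group_keys_into_rows_alt p.2 row_tolerance
termination_by key_bounding_boxes.length
decreasing_by
  exact Nat.lt_succ_of_le (takeRowB_snd_length head tail row_tolerance)

-- ===== PRECONDITION & SPEC =====
def Spec_group_keys_into_rows (key_bounding_boxes : List (Int × Int × Int × Int)) (row_tolerance : Int) (out : List (List (Int × Int × Int × Int))) : Prop := out = group_keys_into_rows_alt key_bounding_boxes row_tolerance
instance (key_bounding_boxes : List (Int × Int × Int × Int)) (row_tolerance : Int) (out : List (List (Int × Int × Int × Int))) : Decidable (Spec_group_keys_into_rows key_bounding_boxes row_tolerance out) := by unfold Spec_group_keys_into_rows; infer_instance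

-- ===== CLAIM (what is proved, stated in full; the proofs are below) =====
def Claim_equal_group_keys_into_rows : Prop := ∀ (key_bounding_boxes : List (Int × Int × Int × Int)) (row_tolerance : Int), Dom_group_keys_into_rows key_bounding_boxes row_tolerance → Spec_group_keys_into_rows key_bounding_boxes row_tolerance (group_keys_into_rows key_bounding_boxes row_tolerance)

-- ===== LEMMAS AND PROOFS =====

-- the unsorted row partition B produces (proof-only device)
def rawRows (bs : List (Int × Int × Int × Int)) (tol : Int) : List (List (Int × Int × Int × Int)) :=
  match bs with
  | [] => []
  | head :: tail =>
    let p := takeRowB head tail tol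
    (head :: p.1) :: rawRows p.2 tol
termination_by bs.length
decreasing_by
  exact Nat.lt_succ_of_le (takeRowB_snd_length head tail tol)

theorem alt_eq_map_rawRows (n : Nat) (bs : List (Int × Int × Int × Int)) (tol : Int)
    (h : bs.length ≤ n) :
    group_keys_into_rows_alt bs tol
      = (rawRows bs tol).map (fun row => PySem.List.sorted row (fun box => box.1) false) := by
  induction n generalizing bs with
  | zero =>
    have : bs = [] := List.length_eq_zero_iff.mp (Nat.le_zero.mp h)
    subst this; simp [group_keys_into_rows_alt, rawRows]
  | succ n ih =>
    cases bs with
    | nil => simp [group_keys_into_rows_alt, rawRows]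
    | cons head tail =>
      rw [group_keys_into_rows_alt, rawRows]
      simp only [List.map_cons]
      congr 1
      exact ih _ (le_trans (takeRowB_snd_length head tail tol)
        (Nat.le_of_succ_le_succ h))

-- finalize A's loop state into its rows list
def gkirFin (st : List (List (Int × Int × Int × Int)) × List (Int × Int × Int × Int) × Option Int) :
    List (List (Int × Int × Int × Int)) :=
  if st.2.1 ≠ [] then st.1 ++ [st.2.1] else st.1

-- loop invariant for A's fold, driven from a mid-loop state: current row is cur ++ [prev],
-- current_y is prev's Y, and the rest of the run produces exactly B's row partition
theorem foldA_invariant (bs : List (Int × Int × Int × Int)) (tol : Int)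
    (rows : List (List (Int × Int × Int × Int))) (cur : List (Int × Int × Int × Int))
    (prev : Int × Int × Int × Int) :
    gkirFin (bs.foldl (gkirStep tol) (rows, cur ++ [prev], some prev.2.1))
      = rows ++ ((cur ++ prev :: (takeRowB prev bs tol).1) :: rawRows (takeRowB prev bs tol).2 tol) := by
  induction bs generalizing rows cur prev with
  | nil => simp [gkirFin, takeRowB, rawRows]
  | cons b bs ih =>
    simp only [List.foldl_cons, gkirStep, takeRowB]
    split
    · -- b joins the current row
      have h := ih rows (cur ++ [prev]) b
      simpa [List.append_assoc] using h
    · -- b starts a new row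
      have h := ih (rows ++ [cur ++ [prev]]) [] b
      simp only [List.nil_append] at h
      rw [h]
      simp [rawRows, List.append_assoc]

-- ===== VERDICT (by name: the statement is the Claim_ definition above) =====
theorem group_keys_into_rows_spec : Claim_equal_group_keys_into_rows := by
  intro bs tol _
  unfold Spec_group_keys_into_rows
  cases bs with
  | nil => simp [group_keys_into_rows, group_keys_into_rows_alt]
  | cons head tail =>
    rw [alt_eq_map_rawRows (head :: tail).length _ _ (le_refl _)]
    have h := foldA_invariant tail tol [] [] head
    simp only [List.nil_append] at h
    show (gkirFin (List.foldl (gkirStep tol) ([], [head], some head.2.1) tail)).map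
        (fun row => PySem.List.sorted row (fun box => box.1) false)
      = (rawRows (head :: tail) tol).map (fun row => PySem.List.sorted row (fun box => box.1) false)
    rw [h, rawRows]
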